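-- pv_equiv track=rewrite | github.com/mongodb/snooty-parser | snooty/tinydocutils/utils.py | escape2null
-- ===== SOURCE A (Python) =====
-- def escape2null(text: str) -> str:
--     """Return a string with escape-backslashes converted to nulls."""
--     parts = []
--     start = 0
--     while True:
--         found = text.find("\\", start)
--         if found == -1:
--             parts.append(text[start:])
--             return "".join(parts)
--         parts.append(text[start:found])
--         parts.append("\x00" + text[found + 1 : found + 2])
--         start = found + 2  # skip character after escape
-- ===== SOURCE B (Python) =====
-- def escape2null(text: str) -> str:
--     """Return a string with escape-backslashes converted to nulls."""
--     out = []
--     escaped = False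
--     for ch in text:
--         if escaped:
--             out.append(ch)
--             escaped = False
--         elif ch == "\\":
--             out.append("\x00")
--             escaped = True
--         else:
--             out.append(ch)
--     return "".join(out)
-- ===== Notes on version B (the rewrite author's own statement) =====
-- stated objective: simpler
-- what changed: Replaced the find-cursor loop that slices out segments between backslashes with a single character-by-character state machine keeping a boolean escape flag.
import Mathlib
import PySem

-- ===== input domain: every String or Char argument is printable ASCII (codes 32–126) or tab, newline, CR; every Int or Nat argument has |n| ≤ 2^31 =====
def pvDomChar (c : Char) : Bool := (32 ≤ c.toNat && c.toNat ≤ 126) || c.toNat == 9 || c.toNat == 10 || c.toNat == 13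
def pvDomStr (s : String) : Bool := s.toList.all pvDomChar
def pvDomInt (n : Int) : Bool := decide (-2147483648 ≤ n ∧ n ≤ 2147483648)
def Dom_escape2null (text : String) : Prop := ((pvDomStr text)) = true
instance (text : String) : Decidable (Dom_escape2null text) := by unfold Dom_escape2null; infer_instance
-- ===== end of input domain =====

-- B is a simpler single-pass char state machine with a boolean escape flag replacing A's find-cursor/slicing loop; same return value.

-- ===== PORT A =====
-- needed by the port's decreasing_by: find with a start index past the end returns -1
theorem findFrom_gt_len (s sub : List Char) (k : Nat) (h : s.length < k) :
    PySem.Chars.findFrom s sub (k : Int) none = -1 := by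
  simp only [PySem.Chars.findFrom]
  have h1 : ¬ ((k : Int) < 0) := by omega
  rw [if_neg h1, if_pos (by exact_mod_cast h)]

def escape2null_go (cs : List Char) (start : Nat) (parts : List (List Char)) : List Char :=
  -- found = text.find("\\", start)
  if _h : PySem.Chars.findFrom cs ['\\'] (start : Int) none = -1 then
    -- parts.append(text[start:]); return "".join(parts)
    PySem.Chars.join [] (parts ++ [PySem.Chars.slice cs (some (start : Int)) none])
  else
    -- parts.append(text[start:found]); parts.append("\x00" + text[found+1:found+2]); start = found + 2
    escape2null_go cs ((PySem.Chars.findFrom cs ['\\'] (start : Int) none).toNat + 2)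
      (parts ++ [PySem.Chars.slice cs (some (start : Int)) (some (PySem.Chars.findFrom cs ['\\'] (start : Int) none)),
                 '\x00' :: PySem.Chars.slice cs (some (PySem.Chars.findFrom cs ['\\'] (start : Int) none + 1))
                          (some (PySem.Chars.findFrom cs ['\\'] (start : Int) none + 2))])
termination_by cs.length + 1 - start
decreasing_by
  by_cases hk : start ≤ cs.length
  · have hspec := PySem.Chars.findFrom_natCast_spec cs ['\\'] start hk _h
    have h2 := hspec.2.1
    have hlt : (PySem.Chars.findFrom cs ['\\'] (start : Int) none).toNat < cs.length := by
      by_contra hge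
      rw [List.drop_eq_nil_of_le (by omega)] at h2
      exact absurd (List.eq_nil_of_prefix_nil h2) (by simp)
    omega
  · exact absurd (findFrom_gt_len cs ['\\'] start (by omega)) _h

def escape2null (text : String) : String :=
  String.ofList (escape2null_go text.toList 0 [])

-- ===== PORT B =====
def escape2null_alt (text : String) : String :=
  -- out = []; escaped = False; for ch in text: …; return "".join(out)
  let r := text.toList.foldl
    (fun (st : List Char × Bool) ch =>
      if st.2 = true then (st.1 ++ [ch], false)
      else if ch = '\\' then (st.1 ++ ['\x00'], true)
      else (st.1 ++ [ch], false))
    ([], false)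
  String.ofList r.1

-- ===== PRECONDITION & SPEC =====
def Spec_escape2null (text : String) (out : String) : Prop := out = escape2null_alt text
instance (text : String) (out : String) : Decidable (Spec_escape2null text out) := by unfold Spec_escape2null; infer_instance

-- ===== CLAIM (what is proved, stated in full; the proofs are below) =====
def Claim_equal_escape2null : Prop := ∀ (text : String), Dom_escape2null text → Spec_escape2null text (escape2null text)

-- ===== LEMMAS AND PROOFS =====

-- the state machine B computes, as a structural recursion
def mach : Bool → List Char → List Char
  | _, [] => []
  | true, c :: rest => c :: mach false rest
  | false, c :: rest =>
      if c = '\\' then '\x00' :: mach true rest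
      else c :: mach false rest

theorem foldl_mach (l : List Char) : ∀ (acc : List Char) (esc : Bool),
    (l.foldl
      (fun (st : List Char × Bool) ch =>
        if st.2 = true then (st.1 ++ [ch], false)
        else if ch = '\\' then (st.1 ++ ['\x00'], true)
        else (st.1 ++ [ch], false))
      (acc, esc)).1 = acc ++ mach esc l := by
  induction l with
  | nil => intro acc esc; simp [mach]
  | cons c rest ih =>
    intro acc esc
    cases esc with
    | true => simp [mach, ih]
    | false =>
      by_cases hc : c = '\\' <;> simp [mach, hc, ih]

theorem mach_no_backslash (l : List Char) (h : ∀ c ∈ l, c ≠ '\\') :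
    mach false l = l := by
  induction l with
  | nil => rfl
  | cons c rest ih =>
    have hc : c ≠ '\\' := h c (by simp)
    simp [mach, hc, ih (fun d hd => h d (by simp [hd]))]

theorem mach_append (seg l : List Char) (h : ∀ c ∈ seg, c ≠ '\\') :
    mach false (seg ++ l) = seg ++ mach false l := by
  induction seg with
  | nil => rfl
  | cons c rest ih =>
    have hc : c ≠ '\\' := h c (by simp)
    simp [mach, hc, ih (fun d hd => h d (by simp [hd]))]

theorem mach_true_eq (rest : List Char) :
    mach true rest = rest.take 1 ++ mach false (rest.drop 1) := by
  cases rest <;> simp [mach]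

theorem join_nil_flatten (parts : List (List Char)) :
    PySem.Chars.join [] parts = parts.flatten := by
  induction parts with
  | nil => rfl
  | cons p rest ih =>
    cases rest with
    | nil => simp [PySem.Chars.join, List.intercalate]
    | cons q r =>
      simp [PySem.Chars.join, List.intercalate, List.intersperse] at ih ⊢
      exact ih

theorem singleton_infix_iff (a : Char) (l : List Char) : [a] <:+: l ↔ a ∈ l := by
  constructor
  · intro ⟨s, t, hst⟩
    subst hst; simp
  · intro hm
    obtain ⟨s, t, hst⟩ := List.append_of_mem hm
    exact ⟨s, t, by simp [hst]⟩

theorem go_eq (cs : List Char) : ∀ (n start : Nat), cs.length + 1 - start ≤ n →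
    ∀ (parts : List (List Char)),
    escape2null_go cs start parts = PySem.Chars.join [] parts ++ mach false (cs.drop start) := by
  intro n
  induction n with
  | zero =>
    intro start hn parts
    have hgt : cs.length < start := by omega
    rw [escape2null_go, dif_pos (findFrom_gt_len cs ['\\'] start hgt)]
    rw [List.drop_eq_nil_of_le (by omega)]
    have hsl : PySem.Chars.slice cs (some (start : Int)) none = [] := by
      rw [PySem.Chars.slice_eq_listSlice, PySem.List.slice_from cs (by omega : (0:Int) ≤ (start : Int))]
      exact List.drop_eq_nil_of_le (by simpa using Nat.le_of_lt hgt)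
    rw [hsl]
    simp [join_nil_flatten, mach]
  | succ n ih =>
    intro start hn parts
    by_cases hk : start ≤ cs.length
    · by_cases hf : PySem.Chars.findFrom cs ['\\'] (start : Int) none = -1
      · rw [escape2null_go, dif_pos hf]
        have hno : ¬ (['\\'] <:+: cs.drop start) :=
          (PySem.Chars.findFrom_natCast_eq_neg_one_iff cs ['\\'] start hk).mp hf
        have hnb : ∀ c ∈ cs.drop start, c ≠ '\\' := by
          intro c hc hceq
          exact hno ((singleton_infix_iff '\\' _).mpr (hceq ▸ hc))
        have hsl : PySem.Chars.slice cs (some (start : Int)) none = cs.drop start := by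
          rw [PySem.Chars.slice_eq_listSlice, PySem.List.slice_from cs (by omega : (0:Int) ≤ (start : Int))]
          simp
        rw [hsl, mach_no_backslash _ hnb]
        simp [join_nil_flatten]
      · -- a backslash is found at index f
        have hspec := PySem.Chars.findFrom_natCast_spec cs ['\\'] start hk hf
        set F := PySem.Chars.findFrom cs ['\\'] (start : Int) none with hF
        have h1 : (start : Int) ≤ F := hspec.1
        have h2 : ['\\'] <+: cs.drop F.toNat := hspec.2.1
        have h3 := hspec.2.2
        set f := F.toNat with hfdef
        have hFf : F = (f : Int) := by omega
        have hflt : f < cs.length := by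
          by_contra hge
          rw [List.drop_eq_nil_of_le (by omega)] at h2
          exact absurd (List.eq_nil_of_prefix_nil h2) (by simp)
        have hsf : start ≤ f := by omega
        -- decompose the suffix
        obtain ⟨rest, hrest⟩ : ∃ rest, cs.drop f = '\\' :: rest := by
          obtain ⟨t, ht⟩ := h2
          exact ⟨t, by simp [← ht]⟩
        have hrest_eq : rest = cs.drop (f + 1) := by
          have := congrArg (List.drop 1) hrest
          simpa [List.drop_drop, Nat.add_comm] using this.symm
        have hseg : cs.drop start = (cs.drop start).take (f - start) ++ cs.drop f := by
          have e1 : (cs.drop start).drop (f - start) = cs.drop f := by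
            rw [List.drop_drop]
            congr 1
            omega
          rw [← e1, List.take_append_drop]
        have hsegnb : ∀ c ∈ (cs.drop start).take (f - start), c ≠ '\\' := by
          intro c hc hceq
          rw [List.mem_iff_getElem] at hc
          obtain ⟨i, hi, hgi⟩ := hc
          have hilen : i < f - start := by
            have := List.length_take_le (f - start) (cs.drop start)
            omega
          have hidrop : i < (cs.drop start).length := by
            simp; omega
          rw [List.getElem_take, List.getElem_drop] at hgi
          apply h3 (start + i) (by omega) (by omega)
          have : cs.drop (start + i) = c :: cs.drop (start + i + 1) := by
            rw [List.drop_eq_getElem_cons (by omega)]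
            simp [hgi]
          rw [this, hceq]
          exact ⟨_, rfl⟩
        -- unfold one loop step of A
        rw [escape2null_go, dif_neg hf]
        rw [← hF, hFf]
        have hslice1 : PySem.Chars.slice cs (some (start : Int)) (some (f : Int)) =
            List.take (f - start) (cs.drop start) := by
          rw [PySem.Chars.slice_eq_listSlice, PySem.List.slice_natCast]
        have hslice2 : PySem.Chars.slice cs (some ((f : Int) + 1)) (some ((f : Int) + 2)) =
            rest.take 1 := by
          rw [PySem.Chars.slice_eq_listSlice]
          have : ((f : Int) + 1) = ((f + 1 : Nat) : Int) := by push_cast; ring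
          rw [this]
          have : ((f : Int) + 2) = ((f + 2 : Nat) : Int) := by push_cast; ring
          rw [this, PySem.List.slice_natCast]
          rw [hrest_eq]
          congr 1
          omega
        rw [hslice1, hslice2]
        rw [ih ((f : Int).toNat + 2) (by rw [Int.toNat_natCast]; omega) _]
        rw [Int.toNat_natCast]
        have hmach : mach false (cs.drop start) =
            List.take (f - start) (cs.drop start) ++ '\x00' :: (rest.take 1 ++ mach false (cs.drop (f + 2))) := by
          conv_lhs => rw [hseg]
          rw [mach_append _ _ hsegnb, hrest]
          simp only [mach, if_pos]
          rw [mach_true_eq, hrest_eq, List.drop_drop]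
        rw [hmach, join_nil_flatten, join_nil_flatten]
        simp
    · -- start past the end: terminal step
      rw [escape2null_go, dif_pos (findFrom_gt_len cs ['\\'] start (by omega))]
      rw [List.drop_eq_nil_of_le (by omega)]
      have hsl : PySem.Chars.slice cs (some (start : Int)) none = [] := by
        rw [PySem.Chars.slice_eq_listSlice, PySem.List.slice_from cs (by omega : (0:Int) ≤ (start : Int))]
        exact List.drop_eq_nil_of_le (by omega)
      rw [hsl]
      simp [join_nil_flatten, mach]

-- ===== VERDICT (by name: the statement is the Claim_ definition above) =====
theorem escape2null_spec : Claim_equal_escape2null := by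
  intro text _
  unfold Spec_escape2null escape2null escape2null_alt
  rw [go_eq text.toList (text.toList.length + 1) 0 (by omega) []]
  simp [foldl_mach]
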